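-- pv_equiv track=rewrite | github.com/RomainOr/Reasoning-with-ALCS | bacs/metrics.py | _when_full_knowledge_is_achieved
-- ===== SOURCE A (Python) =====
-- def _when_full_knowledge_is_achieved(metrics):
--     first_trial_when_full_knowledge = -1
--     stable_trial_when_full_knowledge = -1
--     last_trial_when_full_knowledge = -1
--     for trial in metrics:
--         if first_trial_when_full_knowledge == -1 and trial['knowledge'] == 100:
--             first_trial_when_full_knowledge = trial['trial']
--         if stable_trial_when_full_knowledge == -1 and trial['knowledge'] == 100:
--             stable_trial_when_full_knowledge = trial['trial']
--         if stable_trial_when_full_knowledge != -1 and trial['knowledge'] != 100: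
--             stable_trial_when_full_knowledge = -1
--         if trial['knowledge'] == 100:
--             last_trial_when_full_knowledge = trial['trial']
--     return first_trial_when_full_knowledge, stable_trial_when_full_knowledge, last_trial_when_full_knowledge
-- ===== SOURCE B (Python) =====
-- def _when_full_knowledge_is_achieved(metrics):
--     metrics = list(metrics)
--     full = [m['trial'] for m in metrics if m['knowledge'] == 100]
--     first = full[0] if full else -1
--     last = full[-1] if full else -1
--     stable = -1
--     for m in reversed(metrics):
--         if m['knowledge'] == 100:
--             stable = m['trial']
--         else:
--             break
--     return first, stable, last
-- ===== Notes on version B (the rewrite author's own statement) =====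
-- stated objective: simpler
-- what changed: Replaces the single flag-driven pass with three plainly-shaped reads: a comprehension of all full-knowledge trials (first/last are its ends) and a short backward scan for the stable trial of the trailing run.
import Mathlib
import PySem

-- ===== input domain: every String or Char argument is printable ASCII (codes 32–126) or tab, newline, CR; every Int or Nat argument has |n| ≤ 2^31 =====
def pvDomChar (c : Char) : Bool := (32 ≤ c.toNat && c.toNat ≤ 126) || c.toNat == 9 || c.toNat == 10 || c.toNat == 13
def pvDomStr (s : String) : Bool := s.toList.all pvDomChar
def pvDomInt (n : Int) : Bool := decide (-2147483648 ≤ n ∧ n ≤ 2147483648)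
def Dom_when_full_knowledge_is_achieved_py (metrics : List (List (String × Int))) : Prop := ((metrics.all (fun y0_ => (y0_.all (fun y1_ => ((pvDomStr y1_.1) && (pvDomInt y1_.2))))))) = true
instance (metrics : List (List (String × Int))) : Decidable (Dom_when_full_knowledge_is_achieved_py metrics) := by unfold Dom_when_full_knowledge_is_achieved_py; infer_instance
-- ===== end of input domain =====

-- One honest line: B reads the full-knowledge trial list once for first/last and scans backwards
-- for the stable trailing run, instead of A's single flag-driven pass; objective: simpler.

-- ===== PORT A =====
-- shared lookup helpers: trial['knowledge'] / trial['trial'] (first-match dict lookup; total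
-- form with default 0, exact under Pre_, which guarantees the key is present wherever read)
def pvKnow (m : List (String × Int)) : Int := ((PySem.Dict.mk m).get? "knowledge").getD 0
def pvTrial (m : List (String × Int)) : Int := ((PySem.Dict.mk m).get? "trial").getD 0

-- one loop iteration of A over the state (first, stable, last)
def pvStepA (st : Int × Int × Int) (m : List (String × Int)) : Int × Int × Int :=
  let f := if st.1 = -1 ∧ pvKnow m = 100 then pvTrial m else st.1
  let s := if st.2.1 = -1 ∧ pvKnow m = 100 then pvTrial m else st.2.1
  let s := if s ≠ -1 ∧ pvKnow m ≠ 100 then -1 else s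
  let l := if pvKnow m = 100 then pvTrial m else st.2.2
  (f, s, l)

def when_full_knowledge_is_achieved_py (metrics : List (List (String × Int))) : Int × Int × Int :=
  metrics.foldl pvStepA (-1, -1, -1)

-- ===== PORT B =====
-- full = [m['trial'] for m in metrics if m['knowledge'] == 100]
def pvFull (metrics : List (List (String × Int))) : List Int :=
  (metrics.filter (fun m => pvKnow m = 100)).map pvTrial

-- the reversed-scan loop: overwrite stable while knowledge == 100, break at the first non-100
def pvStableScan : List (List (String × Int)) → Int → Int
  | [], acc => acc
  | m :: rest, acc => if pvKnow m = 100 then pvStableScan rest (pvTrial m) else acc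

def when_full_knowledge_is_achieved_py_alt (metrics : List (List (String × Int))) : Int × Int × Int :=
  let full := pvFull metrics
  let first := full.head?.getD (-1)
  let last := full.getLast?.getD (-1)
  let stable := pvStableScan metrics.reverse (-1)
  (first, stable, last)

-- ===== PRECONDITION & SPEC =====
-- Pre_ excludes dicts without a 'knowledge' key and full-knowledge dicts without a 'trial' key
-- (A raises KeyError there), and full-knowledge dicts whose trial number is -1 — outside the
-- natural domain of trial numbers, where A's reuse of -1 as a not-yet-seen sentinel makes it
-- skip or re-arm the first/stable slots accidentally.
def Pre_when_full_knowledge_is_achieved_py (metrics : List (List (String × Int))) : Prop :=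
  ∀ m ∈ metrics, ((PySem.Dict.mk m).get? "knowledge").isSome ∧
    ((PySem.Dict.mk m).get? "knowledge" = some 100 →
      ((PySem.Dict.mk m).get? "trial").isSome ∧ (PySem.Dict.mk m).get? "trial" ≠ some (-1))
instance (metrics : List (List (String × Int))) : Decidable (Pre_when_full_knowledge_is_achieved_py metrics) := by unfold Pre_when_full_knowledge_is_achieved_py; infer_instance

def pvWitness_when_full_knowledge_is_achieved_py : (List (List (String × Int))) :=
  [[("knowledge", 100), ("trial", 3)], [("knowledge", 50), ("trial", 4)], [("knowledge", 100), ("trial", 7)]]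

def Spec_when_full_knowledge_is_achieved_py (metrics : List (List (String × Int))) (out : Int × Int × Int) : Prop := out = when_full_knowledge_is_achieved_py_alt metrics
instance (metrics : List (List (String × Int))) (out : Int × Int × Int) : Decidable (Spec_when_full_knowledge_is_achieved_py metrics out) := by unfold Spec_when_full_knowledge_is_achieved_py; infer_instance

-- ===== CLAIM (what is proved, stated in full; the proofs are below) =====
def Claim_equal_when_full_knowledge_is_achieved_py : Prop := ∀ (metrics : List (List (String × Int))), Dom_when_full_knowledge_is_achieved_py metrics → Pre_when_full_knowledge_is_achieved_py metrics → Spec_when_full_knowledge_is_achieved_py metrics (when_full_knowledge_is_achieved_py metrics)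

-- ===== LEMMAS AND PROOFS =====

-- row-wise consequence of Pre_: a full-knowledge row has a trial number ≠ -1
def pvGood (m : List (String × Int)) : Prop := pvKnow m = 100 → pvTrial m ≠ -1

lemma pvGood_of_pre (m : List (String × Int))
    (h : ((PySem.Dict.mk m).get? "knowledge").isSome ∧
      ((PySem.Dict.mk m).get? "knowledge" = some 100 →
        ((PySem.Dict.mk m).get? "trial").isSome ∧ (PySem.Dict.mk m).get? "trial" ≠ some (-1))) :
    pvGood m := by
  intro hk
  obtain ⟨h1, h2⟩ := h
  unfold pvKnow at hk
  cases hg : (PySem.Dict.mk m).get? "knowledge" with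
  | none => simp [hg] at h1
  | some k =>
    rw [hg] at hk; simp at hk; subst hk
    obtain ⟨h3, h4⟩ := h2 hg
    unfold pvTrial
    cases ht : (PySem.Dict.mk m).get? "trial" with
    | none => simp [ht] at h3
    | some t => simp [ht] at h4 ⊢; exact h4

lemma pvStableScan_ne (rows : List (List (String × Int))) (hg : ∀ m ∈ rows, pvGood m) :
    ∀ acc : Int, acc ≠ -1 → pvStableScan rows acc ≠ -1 := by
  induction rows with
  | nil => intro acc h; simpa [pvStableScan] using h
  | cons m rest ih =>
    intro acc h
    by_cases hk : pvKnow m = 100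
    · simp only [pvStableScan, if_pos hk]
      exact ih (fun x hx => hg x (List.mem_cons_of_mem _ hx)) _
        (hg m (List.mem_cons_self) hk)
    · simpa [pvStableScan, hk] using h

lemma pvStableScan_acc (rows : List (List (String × Int))) (hg : ∀ m ∈ rows, pvGood m)
    (acc : Int) :
    pvStableScan rows acc =
      if pvStableScan rows (-1) = -1 then acc else pvStableScan rows (-1) := by
  cases rows with
  | nil => simp [pvStableScan]
  | cons m rest =>
    by_cases hk : pvKnow m = 100
    · have hne : pvStableScan rest (pvTrial m) ≠ -1 :=
        pvStableScan_ne rest (fun x hx => hg x (List.mem_cons_of_mem _ hx)) _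
          (hg m (List.mem_cons_self) hk)
      simp [pvStableScan, hk, hne]
    · simp [pvStableScan, hk]

lemma pvFull_ne_neg_one (ms : List (List (String × Int))) (hg : ∀ m ∈ ms, pvGood m) :
    ∀ x ∈ pvFull ms, x ≠ -1 := by
  intro x hx
  unfold pvFull at hx
  obtain ⟨m, hm, rfl⟩ := List.mem_map.mp hx
  have hmem := List.mem_filter.mp hm
  have hk : pvKnow m = 100 := by simpa using hmem.2
  exact hg m hmem.1 hk

lemma pvFull_append_singleton (ms : List (List (String × Int))) (m : List (String × Int)) :
    pvFull (ms ++ [m]) = pvFull ms ++ (if pvKnow m = 100 then [pvTrial m] else []) := by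
  unfold pvFull
  rw [List.filter_append, List.map_append]
  by_cases hk : pvKnow m = 100 <;> simp [hk]

-- main invariant: A's fold equals B's three reads, for rows satisfying pvGood
lemma pv_main (ms : List (List (String × Int))) (hg : ∀ m ∈ ms, pvGood m) :
    ms.foldl pvStepA (-1, -1, -1) =
      ((pvFull ms).head?.getD (-1), pvStableScan ms.reverse (-1), (pvFull ms).getLast?.getD (-1)) := by
  induction ms using List.reverseRecOn with
  | nil => simp [pvFull, pvStableScan]
  | append_singleton ms m ih =>
    have hgms : ∀ x ∈ ms, pvGood x := fun x hx => hg x (by simp [hx])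
    have hgm : pvGood m := hg m (by simp)
    rw [List.foldl_append, ih hgms]
    simp only [List.foldl_cons, List.foldl_nil]
    rw [pvFull_append_singleton]
    have hrev : (ms ++ [m]).reverse = m :: ms.reverse := by simp
    rw [hrev]
    by_cases hk : pvKnow m = 100
    · -- last full-knowledge row: last = trial m; stable via scan
      have hscan := pvStableScan_acc ms.reverse (fun x hx => hgms x (by simpa using hx)) (pvTrial m)
      cases hfull : pvFull ms with
      | nil =>
        simp [pvStepA, hk, pvStableScan, hscan, pvFull] at *
      | cons a rest =>
        have ha : a ≠ -1 := pvFull_ne_neg_one ms hgms a (by simp [hfull])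
        have hl : (a :: (rest ++ [pvTrial m])).getLast?.getD (-1) = pvTrial m := by
          rw [show a :: (rest ++ [pvTrial m]) = (a :: rest) ++ [pvTrial m] from rfl,
            List.getLast?_concat]
          rfl
        simp [pvStepA, hk, pvStableScan, hscan, ha, hl]
    · -- non-full row at the end: stable resets to -1, first/last unchanged
      cases hfull : pvFull ms with
      | nil => simp [pvStepA, hk, pvStableScan]
      | cons a rest =>
        have ha : a ≠ -1 := pvFull_ne_neg_one ms hgms a (by simp [hfull])
        by_cases hs : pvStableScan ms.reverse (-1) = -1 <;>
          simp [pvStepA, hk, pvStableScan, ha, hs]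

-- ===== VERDICT (by name: the statement is the Claim_ definition above) =====
theorem when_full_knowledge_is_achieved_py_spec : Claim_equal_when_full_knowledge_is_achieved_py := by
  intro metrics _ hpre
  unfold Spec_when_full_knowledge_is_achieved_py
  unfold when_full_knowledge_is_achieved_py when_full_knowledge_is_achieved_py_alt
  exact pv_main metrics (fun m hm => pvGood_of_pre m (hpre m hm))
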